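-- pv_equiv track=rewrite | github.com/eliel-monfort/Network-CTF | step B - message decoding/Message_Decoding.py | symmetric_encryption
-- ===== SOURCE A (Python) =====
-- def symmetric_encryption(input_data, key):
--     # Determine chunk and key size based on length of data (even or odd)
--     if len(input_data) % 2 == 0:
--         chunk_size = 16
--         # Using the all bits of key
--         key_in_bits = format(key, '016b')
--     else:
--         chunk_size = 8
--         # Using the last 8 bits of the key
--         key_in_bits = format(key, '016b')[-8:]
--
--     # Split data into chunks of appropriate size
--     chunks = [input_data[i:i + chunk_size] for i in range(0, len(input_data), chunk_size)]
--
--     # Perform XOR operation on each chunk with the key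
--     result = ""
--     for chunk in chunks:
--         for bit, key_bit in zip(chunk, key_in_bits):
--             result += '1' if bit != key_bit else '0'
--
--     return result
-- ===== SOURCE B (Python) =====
-- def symmetric_encryption(input_data, key):
--     # One flat pass over the input; no chunk list, no slicing of the key bits:
--     # position i is XORed against bits[offset + i % chunk_size], where offset
--     # points at the last 8 bits of format(key, '016b') in the odd case.
--     bits = format(key, '016b')
--     if len(input_data) % 2 == 0:
--         chunk_size, offset = 16, 0
--     else:
--         chunk_size, offset = 8, len(bits) - 8
--     return ''.join('1' if ch != bits[offset + i % chunk_size] else '0'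
--                    for i, ch in enumerate(input_data))
-- ===== Notes on version B (the rewrite author's own statement) =====
-- stated objective: simpler
-- what changed: Replaces A's chunk-list construction plus nested per-chunk zip loop with a single flat enumerate pass that indexes the unsliced format string directly at offset + i % chunk_size, so neither the chunk list nor the key slice is ever built.
import Mathlib
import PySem

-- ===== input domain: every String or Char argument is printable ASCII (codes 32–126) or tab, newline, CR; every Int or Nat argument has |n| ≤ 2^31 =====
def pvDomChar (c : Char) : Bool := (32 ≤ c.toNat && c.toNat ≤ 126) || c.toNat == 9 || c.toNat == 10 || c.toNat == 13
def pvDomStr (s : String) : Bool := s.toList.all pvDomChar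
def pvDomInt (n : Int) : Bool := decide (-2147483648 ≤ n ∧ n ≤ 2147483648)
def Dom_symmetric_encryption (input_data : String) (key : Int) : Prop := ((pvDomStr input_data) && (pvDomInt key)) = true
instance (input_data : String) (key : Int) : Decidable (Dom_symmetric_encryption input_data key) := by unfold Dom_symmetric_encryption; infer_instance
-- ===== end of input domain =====

-- ===== PORT A =====
-- B replaces A's chunk list + nested per-chunk zip loop with one flat pass indexing
-- the unsliced format string at offset + i % chunk_size (objective: simpler).

-- binary digits of a positive natural, most significant first (bin(n) without '0b'); [] for 0
def pvNatBin : Nat → List Char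
  | 0 => []
  | (n+1) => pvNatBin ((n+1) / 2) ++ [if (n+1) % 2 = 1 then '1' else '0']

-- format(key, '016b'): sign-aware zero padding to total width 16 (exact for every int:
-- nonneg → binary zero-padded to 16; negative → '-' then binary of |key| padded to 15)
def pvFormat016b (key : Int) : List Char :=
  if key < 0 then
    let b := pvNatBin (-key).toNat
    '-' :: (List.replicate (15 - b.length) '0' ++ b)
  else
    let b := if key = 0 then ['0'] else pvNatBin key.toNat
    List.replicate (16 - b.length) '0' ++ b

def symmetric_encryption (input_data : String) (key : Int) : String :=
  let s := input_data.toList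
  -- if len % 2 == 0: chunk_size = 16, all bits; else chunk_size = 8, last 8 bits ([-8:])
  let p : Int × List Char :=
    if s.length % 2 = 0 then ((16 : Int), pvFormat016b key)
    else ((8 : Int), PySem.List.slice (pvFormat016b key) (some (-8)) none)
  -- chunks = [input_data[i:i+chunk_size] for i in range(0, len(input_data), chunk_size)]
  let chunks := (PySem.List.pyRange 0 (s.length : Int) p.1).map
    (fun i => PySem.List.slice s (some i) (some (i + p.1)))
  -- result = ""; for chunk in chunks: for bit, key_bit in zip(chunk, key_in_bits): result += …
  let result := chunks.foldl (fun res chunk =>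
    (chunk.zip p.2).foldl (fun r q => r ++ [if q.1 ≠ q.2 then '1' else '0']) res) []
  String.ofList result

-- ===== PORT B =====
def symmetric_encryption_alt (input_data : String) (key : Int) : String :=
  -- bits = format(key, '016b')
  let bits := pvFormat016b key
  -- chunk_size, offset = (16, 0) if even else (8, len(bits) - 8)
  let q : Int × Int :=
    if input_data.toList.length % 2 = 0 then ((16 : Int), (0 : Int))
    else ((8 : Int), (bits.length : Int) - 8)
  -- ''.join('1' if ch != bits[offset + i % chunk_size] else '0' for i, ch in enumerate(input_data))
  -- the index offset + i % chunk_size is always in range (len(bits) ≥ 16), so pyGetD is exact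
  String.ofList ((PySem.List.enumerate input_data.toList 0).map
    (fun ic => if ic.2 ≠ PySem.List.pyGetD bits (q.2 + PySem.Int.mod ic.1 q.1) '?' then '1' else '0'))

-- ===== PRECONDITION & SPEC =====
def Spec_symmetric_encryption (input_data : String) (key : Int) (out : String) : Prop := out = symmetric_encryption_alt input_data key
instance (input_data : String) (key : Int) (out : String) : Decidable (Spec_symmetric_encryption input_data key out) := by unfold Spec_symmetric_encryption; infer_instance

-- ===== CLAIM (what is proved, stated in full; the proofs are below) =====
def Claim_equal_symmetric_encryption : Prop := ∀ (input_data : String) (key : Int), Dom_symmetric_encryption input_data key → Spec_symmetric_encryption input_data key (symmetric_encryption input_data key)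

-- ===== LEMMAS AND PROOFS =====

theorem pvFormat016b_len (key : Int) : 16 ≤ (pvFormat016b key).length := by
  unfold pvFormat016b
  split_ifs <;> simp <;> omega

theorem key_bits_len (key : Int) :
    (PySem.List.slice (pvFormat016b key) (some (-8)) none).length = 8 := by
  have h := pvFormat016b_len key
  rw [PySem.List.slice_from_neg_ofNat (pvFormat016b key) 8 (by omega)]
  simp
  omega

-- peel the first chunk index off range(0, n, c)
theorem pyRange_step_cons (n c : Int) (hc : 0 < c) (hn : 0 < n) :
    PySem.List.pyRange 0 n c = 0 :: (PySem.List.pyRange 0 (n - c) c).map (· + c) := by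
  rw [PySem.List.pyRange_of_pos 0 n hc, PySem.List.pyRange_of_pos 0 (n - c) hc]
  have hq : 0 ≤ (n - 1) / c := Int.ediv_nonneg (by omega) (by omega)
  have hm : (if (0:Int) < n then ((n - 0 + c - 1) / c).toNat else 0)
      = (if (0:Int) < n - c then ((n - c - 0 + c - 1) / c).toNat else 0) + 1 := by
    rw [if_pos hn]
    by_cases h : (0:Int) < n - c
    · rw [if_pos h]
      have h1 : n - 0 + c - 1 = (n - 1) + 1 * c := by ring
      have h2 : n - c - 0 + c - 1 = n - 1 := by ring
      rw [h1, h2, Int.add_mul_ediv_right _ _ (by omega : c ≠ 0)]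
      omega
    · rw [if_neg h]
      have h1 : n - 0 + c - 1 = (n - 1) + 1 * c := by ring
      rw [h1, Int.add_mul_ediv_right _ _ (by omega : c ≠ 0)]
      have : (n - 1) / c = 0 := by
        apply Int.ediv_eq_zero_of_lt (by omega) (by omega)
      omega
  rw [hm, List.range_succ_eq_map]
  simp [List.map_map, Function.comp]
  intro a _
  ring

-- zip of a short prefix against the key = indexed pass over that prefix
theorem zip_prefix_eq_enum (c : Nat) (k : List Char) (hk : c ≤ k.length) :
    ∀ (t : List Char) (j : Nat), t.length + j ≤ c →
    ((t.zip (k.drop j)).map (fun q => if q.1 ≠ q.2 then '1' else '0'))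
      = (PySem.List.enumerate t (j : Int)).map
          (fun ib => if ib.2 ≠ PySem.List.pyGetD k (PySem.Int.mod ib.1 (c : Int)) '?' then '1' else '0') := by
  intro t
  induction t with
  | nil => intro j _; simp [PySem.List.enumerate_nil]
  | cons x t ih =>
    intro j hj
    have hjc : j < c := by simp at hj; omega
    have hjk : j < k.length := by omega
    have hdrop : k.drop j = k[j] :: k.drop (j + 1) := List.drop_eq_getElem_cons hjk
    rw [hdrop, PySem.List.enumerate_cons]
    simp only [List.zip_cons_cons, List.map_cons]
    have hmod : PySem.Int.mod (j : Int) (c : Int) = ((j % c : Nat) : Int) :=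
      PySem.Int.mod_natCast j c
    have hjmod : j % c = j := Nat.mod_eq_of_lt hjc
    have hget : PySem.List.pyGetD k ((j : Int)) '?' = k[j] := by
      rw [PySem.List.pyGetD_natCast]
      exact List.getD_eq_getElem k '?' hjk
    rw [hmod, hjmod, hget]
    congr 1
    have : ((j : Int) + 1) = ((j + 1 : Nat) : Int) := by push_cast; ring
    rw [this, ih (j + 1) (by simp at hj ⊢; omega)]

-- the mapped pass over enumerate depends on the start index only through its residue mod c
theorem enum_shift (c : Int) (hc : 0 < c) (k : List Char) :
    ∀ (t : List Char) (a b : Int), PySem.Int.mod a c = PySem.Int.mod b c →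
    (PySem.List.enumerate t a).map
        (fun ib => if ib.2 ≠ PySem.List.pyGetD k (PySem.Int.mod ib.1 c) '?' then '1' else '0')
      = (PySem.List.enumerate t b).map
          (fun ib => if ib.2 ≠ PySem.List.pyGetD k (PySem.Int.mod ib.1 c) '?' then '1' else '0') := by
  intro t
  induction t with
  | nil => intro a b _; simp [PySem.List.enumerate_nil]
  | cons x t ih =>
    intro a b hab
    rw [PySem.List.enumerate_cons, PySem.List.enumerate_cons]
    simp only [List.map_cons]
    have hmod : ∀ z : Int, PySem.Int.mod z c = z % c := fun z => PySem.Int.mod_eq_emod_of_pos hc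
    have hab' : a % c = b % c := by rw [← hmod, ← hmod]; exact hab
    have h1 : (a + 1) % c = (b + 1) % c := Int.ModEq.add_right 1 hab'
    rw [hab]
    congr 1
    exact ih (a + 1) (b + 1) (by rw [hmod, hmod]; exact h1)

-- A's chunked nested pass equals a flat modulo pass over the sliced-out key k, for c ≤ |k|
theorem chunked_eq_flat (c : Nat) (hc : 0 < c) (k : List Char) (hk : c ≤ k.length) :
    ∀ (N : Nat) (s : List Char), s.length ≤ N →
    ((PySem.List.pyRange 0 (s.length : Int) (c : Int)).map
        (fun i => PySem.List.slice s (some i) (some (i + (c : Int))))).foldl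
      (fun res chunk => (chunk.zip k).foldl
        (fun r q => r ++ [if q.1 ≠ q.2 then '1' else '0']) res) []
    = (PySem.List.enumerate s 0).map
        (fun ib => if ib.2 ≠ PySem.List.pyGetD k (PySem.Int.mod ib.1 (c : Int)) '?' then '1' else '0') := by
  intro N
  induction N with
  | zero =>
    intro s hs
    have : s = [] := List.eq_nil_of_length_eq_zero (by omega)
    subst this
    simp [PySem.List.enumerate_nil, PySem.List.pyRange_of_pos 0 0 (by exact_mod_cast hc : (0:Int) < (c:Int))]
  | succ N ih =>
    intro s hs
    by_cases hnil : s = []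
    · subst hnil
      simp [PySem.List.enumerate_nil, PySem.List.pyRange_of_pos 0 0 (by exact_mod_cast hc : (0:Int) < (c:Int))]
    · have hn : 0 < s.length := List.length_pos_of_ne_nil hnil
      -- flatten the nested fold into a flatMap
      simp only [PySem.List.foldl_append_singleton_eq_map]
      rw [PySem.List.foldl_append_eq_flatMap, List.nil_append]
      -- peel the first chunk
      rw [pyRange_step_cons (s.length : Int) (c : Int) (by exact_mod_cast hc) (by exact_mod_cast hn)]
      rw [List.map_cons, List.flatMap_cons, List.map_map]
      -- head chunk is s.take c
      have hhead : PySem.List.slice s (some 0) (some (0 + (c : Int))) = s.take c := by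
        rw [zero_add, PySem.List.slice_zero_start, PySem.List.slice_to_natCast]
      -- remaining chunks are the chunks of s.drop c
      have htail : ((PySem.List.pyRange 0 ((s.length : Int) - (c : Int)) (c : Int)).map
            ((fun i => PySem.List.slice s (some i) (some (i + (c : Int)))) ∘ (· + (c : Int))))
          = (PySem.List.pyRange 0 (((s.drop c).length : Int)) (c : Int)).map
            (fun i => PySem.List.slice (s.drop c) (some i) (some (i + (c : Int)))) := by
        by_cases hcs : c ≤ s.length
        · rw [show (((s.drop c).length : Nat) : Int) = (s.length : Int) - (c : Int) by
            simp [List.length_drop]; omega]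
          apply List.map_congr_left
          intro i hi
          rw [PySem.List.mem_pyRange_iff_of_pos (by exact_mod_cast hc)] at hi
          obtain ⟨hi0, hi1, _⟩ := hi
          simp only [Function.comp]
          rw [PySem.List.slice_toNat s (by omega) (by omega),
              PySem.List.slice_toNat (s.drop c) hi0 (by omega)]
          rw [List.drop_drop]
          congr 1
          · omega
          · congr 1
            omega
        · have hdropnil : s.drop c = [] := List.drop_eq_nil_iff.mpr (by omega)
          rw [hdropnil]
          have hcI : (0 : Int) < (c : Int) := by exact_mod_cast hc
          rw [PySem.List.pyRange_of_pos 0 ((s.length : Int) - (c : Int)) hcI,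
              PySem.List.pyRange_of_pos 0 ((([] : List Char).length : Nat) : Int) hcI]
          rw [if_neg (by omega), if_neg (by simp)]
          simp
      rw [htail]
      -- apply the induction hypothesis to s.drop c (flattened the same way)
      have ih' := ih (s.drop c) (by simp [List.length_drop]; omega)
      simp only [PySem.List.foldl_append_singleton_eq_map] at ih'
      rw [PySem.List.foldl_append_eq_flatMap, List.nil_append] at ih'
      rw [ih']
      -- now both sides are over take/drop; recombine the enumerate side
      conv_rhs => rw [← List.take_append_drop c s]
      rw [PySem.List.enumerate_append, List.map_append]
      congr 1
      · -- first chunk: zip against k = indexed pass over the prefix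
        rw [hhead]
        have := zip_prefix_eq_enum c k hk (s.take c) 0 (by simp)
        simp only [List.drop_zero, Nat.cast_zero] at this
        exact this
      · -- shift the start of the tail pass from |take c| back to 0
        by_cases hle : c ≤ s.length
        · apply enum_shift (c : Int) (by exact_mod_cast hc) k
          have ht : (s.take c).length = c := by simp; omega
          rw [ht]
          have hmod := fun z => PySem.Int.mod_eq_emod_of_pos (a := z) (b := (c : Int)) (by exact_mod_cast hc : (0:Int) < (c:Int))
          rw [hmod, hmod]
          simp
        · have hd : s.drop c = [] := List.drop_eq_nil_iff.mpr (by omega)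
          rw [hd]
          simp [PySem.List.enumerate_nil]

-- indexing the [-8:] slice of the key at i % 8 = indexing the full key at (|key| - 8) + i % 8
theorem flat_slice_eq_flat_off (k : List Char) (hk : 16 ≤ k.length) :
    ∀ (t : List Char) (n : Nat),
    (PySem.List.enumerate t (n : Int)).map
        (fun ib => if ib.2 ≠ PySem.List.pyGetD (PySem.List.slice k (some (-8)) none)
            (PySem.Int.mod ib.1 (8 : Int)) '?' then '1' else '0')
      = (PySem.List.enumerate t (n : Int)).map
          (fun ic => if ic.2 ≠ PySem.List.pyGetD k
              (((k.length : Int) - 8) + PySem.Int.mod ic.1 (8 : Int)) '?' then '1' else '0') := by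
  intro t
  induction t with
  | nil => intro n; simp [PySem.List.enumerate_nil]
  | cons x t ih =>
    intro n
    rw [PySem.List.enumerate_cons]
    simp only [List.map_cons]
    have hslice : PySem.List.slice k (some (-8)) none = k.drop (k.length - 8) :=
      PySem.List.slice_from_neg_ofNat k 8 (by omega)
    have hmod : PySem.Int.mod ((n : Int)) (8 : Int) = ((n % 8 : Nat) : Int) :=
      PySem.Int.mod_natCast n 8
    have hr : n % 8 < 8 := Nat.mod_lt n (by omega)
    have hgetL : PySem.List.pyGetD (PySem.List.slice k (some (-8)) none) ((n % 8 : Nat) : Int) '?'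
        = (k.drop (k.length - 8)).getD (n % 8) '?' := by
      rw [hslice, PySem.List.pyGetD_natCast]
    have hgetR : PySem.List.pyGetD k (((k.length : Int) - 8) + ((n % 8 : Nat) : Int)) '?'
        = k.getD (k.length - 8 + n % 8) '?' := by
      rw [show ((k.length : Int) - 8) + ((n % 8 : Nat) : Int) = ((k.length - 8 + n % 8 : Nat) : Int) by
        push_cast [Nat.cast_sub (by omega : 8 ≤ k.length)]; ring]
      rw [PySem.List.pyGetD_natCast]
    have hdropget : (k.drop (k.length - 8)).getD (n % 8) '?' = k.getD (k.length - 8 + n % 8) '?' := by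
      have h1 : k.length - 8 + n % 8 < k.length := by omega
      have h2 : n % 8 < (k.drop (k.length - 8)).length := by simp [List.length_drop]; omega
      rw [List.getD_eq_getElem _ _ h2, List.getD_eq_getElem _ _ h1]
      simp [List.getElem_drop]
    rw [hmod, hgetL, hgetR, hdropget]
    congr 1
    rw [show ((n : Int) + 1) = ((n + 1 : Nat) : Int) by push_cast; ring]
    exact ih (n + 1)

-- ===== VERDICT (by name: the statement is the Claim_ definition above) =====
theorem symmetric_encryption_spec : Claim_equal_symmetric_encryption := by
  intro input_data key _
  unfold Spec_symmetric_encryption symmetric_encryption symmetric_encryption_alt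
  set s := input_data.toList with hs
  by_cases h : s.length % 2 = 0
  · simp only [h, reduceIte]
    congr 1
    have hA := chunked_eq_flat 16 (by omega) (pvFormat016b key) (pvFormat016b_len key) s.length s le_rfl
    simp only [Nat.cast_ofNat] at hA
    rw [hA]
    simp only [zero_add]
  · simp only [if_neg h]
    congr 1
    have hA := chunked_eq_flat 8 (by omega) _ (le_of_eq (key_bits_len key).symm) s.length s le_rfl
    simp only [Nat.cast_ofNat] at hA
    rw [hA]
    have hB := flat_slice_eq_flat_off (pvFormat016b key) (pvFormat016b_len key) s 0
    simp only [Nat.cast_zero] at hB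
    exact hB
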